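-- pv_equiv track=rewrite | github.com/bucknerj/jenkins_scripts | grade-tests.py | is_expected_diff
-- ===== SOURCE A (Python) =====
-- def is_expected_diff(old_fields, new_fields):
--     """Check if a diff line pair is an expected/ignorable difference.
--
--     Ported from compare.awk's exclusion patterns. These cover lines whose
--     content is expected to vary between runs (memory addresses, version
--     numbers, pair counts from parallel decomposition, etc.).
--
--     Fields are 0-indexed content words (diff prefix stripped).
--     compare.awk uses 1-indexed fields where [1]='<', so awk [2] = Python [0].
--     """
--     def f(fields, i):
--         return fields[i] if i < len(fields) else ''
--
--     for fields in (old_fields, new_fields):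
--         # Memory / address / platform-dependent
--         if f(fields, 0) == 'MAXIMUM' and f(fields, 1) == 'SPACE':
--             return True
--         if f(fields, 1) == 'ADDRESS:':
--             return True
--         if f(fields, 0) == 'CONTROL' and f(fields, 1) == 'ARRAY':
--             return True
--         if f(fields, 0) == '>>TESTENDIAN':
--             return True
--         if f(fields, 0) == 'Number':
--             return True
--         if f(fields, 0) == 'FORCE=':
--             return True
--         if f(fields, 0) == 'VCLOSE:':
--             return True
--         # Correlation coefficient (variable precision)
--         if f(fields, 0) == 'CORR.' and f(fields, 1) == 'COEFFICIENT':
--             return True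
--         # Pair counts (parallel decomposition dependent)
--         if f(fields, 1) == 'GROUP' and f(fields, 2) == 'PAIRS':
--             return True
--         if f(fields, 1) == 'PAIRS' and f(fields, 2) == 'USED':
--             return True
--         if f(fields, 1) == 'ATOM' and f(fields, 2) == 'PAIRS':
--             return True
--         if f(fields, 3) == 'ATOM' and f(fields, 4) == 'PAIRS':
--             return True
--         if f(fields, 3) == 'atom' and f(fields, 4) == 'pairs':
--             return True
--         if f(fields, 3) == 'group' and f(fields, 4) == 'pairs':
--             return True
--         # Version / build number fields (awk fields [6],[7],[8] = Python [4],[5],[6])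
--         for i in (4, 5, 6):
--             if f(fields, i) in ('99', '5'):
--                 return True
--
--     # MKIMAT vs MKIMAT2: all fields match except the last
--     if (f(old_fields, 2) == 'has' and f(new_fields, 2) == 'has'
--             and f(old_fields, 0) == f(new_fields, 0)
--             and f(old_fields, 1) == f(new_fields, 1)
--             and f(old_fields, 3) == f(new_fields, 3)
--             and f(old_fields, 4) == f(new_fields, 4)
--             and f(old_fields, 5) == f(new_fields, 5)):
--         return True
--
--     return False
-- ===== SOURCE B (Python) =====
-- # Positional sweep: pad the line to 7 fields once, then walk the positions
-- # left to right, filtering a live set of constraint maps (dict: index -> value);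
-- # a rule survives the sweep iff every constraint it places is met.
-- _CONSTRAINTS = [
--     {0: 'MAXIMUM', 1: 'SPACE'},
--     {1: 'ADDRESS:'},
--     {0: 'CONTROL', 1: 'ARRAY'},
--     {0: '>>TESTENDIAN'},
--     {0: 'Number'},
--     {0: 'FORCE='},
--     {0: 'VCLOSE:'},
--     {0: 'CORR.', 1: 'COEFFICIENT'},
--     {1: 'GROUP', 2: 'PAIRS'},
--     {1: 'PAIRS', 2: 'USED'},
--     {1: 'ATOM', 2: 'PAIRS'},
--     {3: 'ATOM', 4: 'PAIRS'},
--     {3: 'atom', 4: 'pairs'},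
--     {3: 'group', 4: 'pairs'},
--     {4: '99'}, {4: '5'},
--     {5: '99'}, {5: '5'},
--     {6: '99'}, {6: '5'},
-- ]
--
--
-- def _pad(fields, n):
--     return [fields[i] if i < len(fields) else '' for i in range(n)]
--
--
-- def _line_matches(fields):
--     alive = _CONSTRAINTS
--     for i, v in enumerate(_pad(fields, 7)):
--         alive = [r for r in alive if r.get(i, v) == v]
--     return bool(alive)
--
--
-- def is_expected_diff(old_fields, new_fields):
--     if _line_matches(old_fields) or _line_matches(new_fields):
--         return True
--     # MKIMAT vs MKIMAT2: all fields match except the last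
--     po, pn = _pad(old_fields, 6), _pad(new_fields, 6)
--     return po[2] == 'has' == pn[2] and po[:2] == pn[:2] and po[3:] == pn[3:]
-- ===== Notes on version B (the rewrite author's own statement) =====
-- stated objective: alternative
-- what changed: A walks rule by rule through a chain of per-rule if-branches; B pads the line to 7 fields once and does a single left-to-right positional sweep that filters a live set of constraint maps (dict index->value), a rule surviving iff all its constraints are met; the MKIMAT check becomes slice comparisons of the two padded lists.
import Mathlib
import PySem

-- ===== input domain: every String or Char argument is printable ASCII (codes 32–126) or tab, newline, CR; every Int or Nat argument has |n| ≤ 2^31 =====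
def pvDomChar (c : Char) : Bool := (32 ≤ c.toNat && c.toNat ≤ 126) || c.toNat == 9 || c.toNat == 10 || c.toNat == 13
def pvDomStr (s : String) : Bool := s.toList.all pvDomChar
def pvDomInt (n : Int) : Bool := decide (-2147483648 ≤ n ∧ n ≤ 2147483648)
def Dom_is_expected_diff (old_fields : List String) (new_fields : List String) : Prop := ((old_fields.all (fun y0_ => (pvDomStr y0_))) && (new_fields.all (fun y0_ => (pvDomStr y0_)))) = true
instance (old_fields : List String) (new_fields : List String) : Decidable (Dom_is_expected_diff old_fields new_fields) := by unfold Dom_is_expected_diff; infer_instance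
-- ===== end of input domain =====

-- B replaces A's chain of per-rule if-branches by a single left-to-right positional
-- sweep over the padded line that filters a live set of constraint maps (objective: alternative).

-- ===== PORT A =====
-- f(fields, i): fields[i] if i < len(fields) else ''
def fA (fields : List String) (i : Nat) : String := if i < fields.length then fields.getD i "" else ""

-- the body of A's 'for fields in (old_fields, new_fields)' loop: true iff some branch returns
def aBody (fields : List String) : Bool :=
  if fA fields 0 == "MAXIMUM" && fA fields 1 == "SPACE" then true
  else if fA fields 1 == "ADDRESS:" then true
  else if fA fields 0 == "CONTROL" && fA fields 1 == "ARRAY" then true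
  else if fA fields 0 == ">>TESTENDIAN" then true
  else if fA fields 0 == "Number" then true
  else if fA fields 0 == "FORCE=" then true
  else if fA fields 0 == "VCLOSE:" then true
  else if fA fields 0 == "CORR." && fA fields 1 == "COEFFICIENT" then true
  else if fA fields 1 == "GROUP" && fA fields 2 == "PAIRS" then true
  else if fA fields 1 == "PAIRS" && fA fields 2 == "USED" then true
  else if fA fields 1 == "ATOM" && fA fields 2 == "PAIRS" then true
  else if fA fields 3 == "ATOM" && fA fields 4 == "PAIRS" then true
  else if fA fields 3 == "atom" && fA fields 4 == "pairs" then true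
  else if fA fields 3 == "group" && fA fields 4 == "pairs" then true
  -- for i in (4, 5, 6): if f(fields, i) in ('99', '5'): return True
  else [4, 5, 6].any (fun i => ["99", "5"].contains (fA fields i))

def is_expected_diff (old_fields : List String) (new_fields : List String) : Bool :=
  if aBody old_fields then true
  else if aBody new_fields then true
  else if fA old_fields 2 == "has" && fA new_fields 2 == "has"
       && fA old_fields 0 == fA new_fields 0
       && fA old_fields 1 == fA new_fields 1
       && fA old_fields 3 == fA new_fields 3
       && fA old_fields 4 == fA new_fields 4
       && fA old_fields 5 == fA new_fields 5 then true
  else false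

-- ===== PORT B =====
-- each rule is a dict: field index -> required value
def bConstraints : List (PySem.Dict Int String) :=
  [ PySem.Dict.mk [(0, "MAXIMUM"), (1, "SPACE")],
    PySem.Dict.mk [(1, "ADDRESS:")],
    PySem.Dict.mk [(0, "CONTROL"), (1, "ARRAY")],
    PySem.Dict.mk [(0, ">>TESTENDIAN")],
    PySem.Dict.mk [(0, "Number")],
    PySem.Dict.mk [(0, "FORCE=")],
    PySem.Dict.mk [(0, "VCLOSE:")],
    PySem.Dict.mk [(0, "CORR."), (1, "COEFFICIENT")],
    PySem.Dict.mk [(1, "GROUP"), (2, "PAIRS")],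
    PySem.Dict.mk [(1, "PAIRS"), (2, "USED")],
    PySem.Dict.mk [(1, "ATOM"), (2, "PAIRS")],
    PySem.Dict.mk [(3, "ATOM"), (4, "PAIRS")],
    PySem.Dict.mk [(3, "atom"), (4, "pairs")],
    PySem.Dict.mk [(3, "group"), (4, "pairs")],
    PySem.Dict.mk [(4, "99")], PySem.Dict.mk [(4, "5")],
    PySem.Dict.mk [(5, "99")], PySem.Dict.mk [(5, "5")],
    PySem.Dict.mk [(6, "99")], PySem.Dict.mk [(6, "5")] ]

-- _pad(fields, n) = [fields[i] if i < len(fields) else '' for i in range(n)]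
def bPad (fields : List String) (n : Nat) : List String :=
  (List.range n).map (fun i => if i < fields.length then fields.getD i "" else "")

-- _line_matches: sweep the padded positions, filtering the live rule set
def bLineMatches (fields : List String) : Bool :=
  let alive := (PySem.List.enumerate (bPad fields 7)).foldl
    (fun alive iv => alive.filter (fun r => PySem.Dict.getD r iv.1 iv.2 == iv.2))
    bConstraints
  !alive.isEmpty

def is_expected_diff_alt (old_fields : List String) (new_fields : List String) : Bool :=
  if bLineMatches old_fields || bLineMatches new_fields then true
  else
    -- MKIMAT vs MKIMAT2: all fields match except the last
    let po := bPad old_fields 6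
    let pn := bPad new_fields 6
    -- po[2] / pn[2]: index 2 < 6 = length of the pad, so plain getD is exact here
    (po.getD 2 "" == "has" && "has" == pn.getD 2 "")
      && PySem.List.slice po none (some 2) == PySem.List.slice pn none (some 2)
      && PySem.List.slice po (some 3) none == PySem.List.slice pn (some 3) none

-- ===== PRECONDITION & SPEC =====
def Spec_is_expected_diff (old_fields : List String) (new_fields : List String) (out : Bool) : Prop := out = is_expected_diff_alt old_fields new_fields
instance (old_fields : List String) (new_fields : List String) (out : Bool) : Decidable (Spec_is_expected_diff old_fields new_fields out) := by unfold Spec_is_expected_diff; infer_instance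

-- ===== CLAIM (what is proved, stated in full; the proofs are below) =====
def Claim_equal_is_expected_diff : Prop := ∀ (old_fields : List String) (new_fields : List String), Dom_is_expected_diff old_fields new_fields → Spec_is_expected_diff old_fields new_fields (is_expected_diff old_fields new_fields)


-- ===== LEMMAS AND PROOFS =====
theorem if_true_or (c b : Bool) : (if c then true else b) = (c || b) := by cases c <;> simp

-- repeated filtering along a fold = one filter by the conjunction of all tests
theorem foldl_filter {α β : Type} (xs : List α) (p : α → β → Bool) (init : List β) :
    xs.foldl (fun acc x => acc.filter (p x)) init
      = init.filter (fun r => xs.all (fun x => p x r)) := by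
  induction xs generalizing init with
  | nil => simp
  | cons x xs ih =>
      simp only [List.foldl_cons, ih, List.filter_filter, List.all_cons]
      congr 1
      funext r
      exact Bool.and_comm _ _

theorem not_isEmpty_filter {β : Type} (l : List β) (p : β → Bool) :
    (!(l.filter p).isEmpty) = l.any p := by
  induction l with
  | nil => simp
  | cons x xs ih => by_cases h : p x <;> simp [h, ih]

theorem beq_str_comm (a b : String) : (a == b) = (b == a) := by
  rw [Bool.eq_iff_iff]; simp only [beq_iff_eq]; exact eq_comm

theorem bLineMatches_eq_aBody (fields : List String) :
    bLineMatches fields = aBody fields := by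
  have hswap : ∀ (r : PySem.Dict Int String) (i : Int) (v : String),
      (PySem.Dict.getD r i v == v) = (v == PySem.Dict.getD r i v) :=
    fun r i v => beq_str_comm _ _
  simp only [bLineMatches, foldl_filter, not_isEmpty_filter, bPad, List.range_succ,
    List.range_zero, List.nil_append, List.map_cons, List.map_nil, List.cons_append,
    PySem.List.enumerate_cons, PySem.List.enumerate_nil, hswap]
  set_option maxRecDepth 100000 in
  simp only [bConstraints, aBody, fA, if_true_or, List.any_cons, List.any_nil,
    List.all_cons, List.all_nil, List.contains_cons, List.contains_nil,
    PySem.Dict.get?, PySem.Dict.getD]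
  simp [Bool.or_assoc]

set_option maxHeartbeats 2000000 in
set_option maxRecDepth 100000 in
theorem mk_part_eq (old_fields new_fields : List String) :
    (fA old_fields 2 == "has" && fA new_fields 2 == "has"
       && fA old_fields 0 == fA new_fields 0
       && fA old_fields 1 == fA new_fields 1
       && fA old_fields 3 == fA new_fields 3
       && fA old_fields 4 == fA new_fields 4
       && fA old_fields 5 == fA new_fields 5)
    = (((bPad old_fields 6).getD 2 "" == "has" && "has" == (bPad new_fields 6).getD 2 "")
      && PySem.List.slice (bPad old_fields 6) none (some 2) == PySem.List.slice (bPad new_fields 6) none (some 2)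
      && PySem.List.slice (bPad old_fields 6) (some 3) none == PySem.List.slice (bPad new_fields 6) (some 3) none) := by
  simp [bPad, List.range_succ, pysem, fA, beq_str_comm "has", Bool.and_assoc]

-- ===== VERDICT (by name: the statement is the Claim_ definition above) =====
theorem is_expected_diff_spec : Claim_equal_is_expected_diff := by
  intro old_fields new_fields _
  unfold Spec_is_expected_diff is_expected_diff is_expected_diff_alt
  simp only [bLineMatches_eq_aBody, if_true_or, Bool.or_false, mk_part_eq, Bool.or_assoc]
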